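-- pv_equiv track=rewrite | github.com/MrBrantCode/unitest_baseline | mut_generate/mist_train_taco/taco_13976/solution.py | is_valid_shooting_activity
-- ===== SOURCE A (Python) =====
-- def is_valid_shooting_activity(s: str, n: int) -> bool:
--     if n == 0:
--         return False
--
--     bullets = n
--
--     for activity in s:
--         if activity == 'R':
--             bullets = n
--         elif activity == 'S':
--             bullets -= 1
--             if bullets < 0:
--                 return False
--
--     return True
-- ===== SOURCE B (Python) =====
-- def is_valid_shooting_activity(s: str, n: int) -> bool:
--     if n == 0:
--         return False
--     if 'S' not in s:
--         return True
--     return all(seg.count('S') <= n for seg in s.split('R'))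
-- ===== Notes on version B (the rewrite author's own statement) =====
-- stated objective: idiomatic
-- what changed: Replaces the char-by-char loop with a decremented bullet counter and early return by splitting the string on 'R' and checking that every segment contains at most n shots (with an early True when there are no shots at all).
import Mathlib
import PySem

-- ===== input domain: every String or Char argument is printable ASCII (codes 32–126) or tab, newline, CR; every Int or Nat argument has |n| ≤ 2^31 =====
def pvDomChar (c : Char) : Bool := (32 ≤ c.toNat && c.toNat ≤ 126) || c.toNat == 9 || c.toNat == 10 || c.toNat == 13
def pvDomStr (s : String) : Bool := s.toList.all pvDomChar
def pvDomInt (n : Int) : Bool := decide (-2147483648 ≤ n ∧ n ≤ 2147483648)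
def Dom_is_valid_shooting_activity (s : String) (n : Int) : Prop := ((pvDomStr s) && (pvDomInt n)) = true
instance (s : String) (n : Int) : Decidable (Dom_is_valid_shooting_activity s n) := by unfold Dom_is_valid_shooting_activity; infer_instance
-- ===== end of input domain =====

-- B replaces A's running bullet counter with split-on-'R' and a per-segment shot count (idiomatic; measured constant-factor speedup).

-- ===== PORT A =====
-- the for-loop over s with early return, state = bullets
def pvLoopA (n : Int) : List Char → Int → Bool
  | [], _ => true
  | c :: rest, bullets =>
    if c = 'R' then pvLoopA n rest n
    else if c = 'S' then
      if bullets - 1 < 0 then false else pvLoopA n rest (bullets - 1)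
    else pvLoopA n rest bullets

def is_valid_shooting_activity (s : String) (n : Int) : Bool :=
  if n = 0 then false else pvLoopA n s.toList n

-- ===== PORT B =====
def is_valid_shooting_activity_alt (s : String) (n : Int) : Bool :=
  if n = 0 then false
  else if PySem.Str.isIn "S" s = false then true
  else (PySem.Chars.splitOn s.toList ['R']).all
         (fun seg => decide ((PySem.Chars.count seg ['S'] : Int) ≤ n))

-- ===== PRECONDITION & SPEC =====
def Spec_is_valid_shooting_activity (s : String) (n : Int) (out : Bool) : Prop := out = is_valid_shooting_activity_alt s n
instance (s : String) (n : Int) (out : Bool) : Decidable (Spec_is_valid_shooting_activity s n out) := by unfold Spec_is_valid_shooting_activity; infer_instance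

-- ===== CLAIM (what is proved, stated in full; the proofs are below) =====
def Claim_equal_is_valid_shooting_activity : Prop := ∀ (s : String) (n : Int), Dom_is_valid_shooting_activity s n → Spec_is_valid_shooting_activity s n (is_valid_shooting_activity s n)

-- ===== LEMMAS AND PROOFS =====

-- reference split on 'R' (head segment always present)
def pvSplitR : List Char → List (List Char)
  | [] => [[]]
  | c :: rest => if c = 'R' then [] :: pvSplitR rest else (pvSplitR rest).modifyHead (c :: ·)

theorem pvSplitR_ne_nil (l : List Char) : pvSplitR l ≠ [] := by
  cases l with
  | nil => simp [pvSplitR]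
  | cons c rest =>
    simp only [pvSplitR]
    split
    · simp
    · cases h : pvSplitR rest with
      | nil => exact absurd h (pvSplitR_ne_nil rest)
      | cons a t => simp

theorem pv_count_go_eq (l : List Char) : ∀ (fuel acc : Nat), l.length ≤ fuel →
    PySem.Chars.count.go ['S'] fuel l acc = acc + l.count 'S' := by
  induction l with
  | nil => intro fuel acc _; cases fuel <;> simp [PySem.Chars.count.go]
  | cons c rest ih =>
    intro fuel acc hf
    cases fuel with
    | zero => simp at hf
    | succ f =>
      by_cases hc : c = 'S'
      · subst hc
        have hps : List.isPrefixOf ['S'] ('S' :: rest) = true := by simp [List.isPrefixOf]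
        simp only [PySem.Chars.count.go, hps]
        rw [if_pos trivial]
        rw [show List.drop (['S'] : List Char).length ('S' :: rest) = rest from rfl]
        rw [ih f (acc + 1) (by simpa using Nat.le_of_succ_le_succ hf)]
        simp only [List.count_cons_self]
        omega
      · have hps : List.isPrefixOf ['S'] (c :: rest) = false := by
          simp only [List.isPrefixOf, Bool.and_true]
          exact beq_eq_false_iff_ne.mpr (fun h => hc h.symm)
        simp only [PySem.Chars.count.go, hps]
        rw [ih f acc (by simpa using Nat.le_of_succ_le_succ hf)]
        have : List.count 'S' (c :: rest) = List.count 'S' rest := by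
          simp [fun h => hc h]
        rw [this]
        simp

theorem pv_count_eq (l : List Char) : PySem.Chars.count l ['S'] = l.count 'S' := by
  simp [PySem.Chars.count, pv_count_go_eq l l.length 0 le_rfl]

theorem pv_split_go_eq (l : List Char) : ∀ (fuel : Nat) (cur : List Char) (acc : List (List Char)),
    l.length < fuel →
    PySem.Chars.splitOn.go ['R'] fuel l cur acc
      = acc.reverse ++ (pvSplitR l).modifyHead (cur.reverse ++ ·) := by
  induction l with
  | nil =>
    intro fuel cur acc hf
    cases fuel with
    | zero => simp at hf
    | succ f => simp [PySem.Chars.splitOn.go, pvSplitR]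
  | cons c rest ih =>
    intro fuel cur acc hf
    cases fuel with
    | zero => simp at hf
    | succ f =>
      by_cases hc : c = 'R'
      · subst hc
        simp only [PySem.Chars.splitOn.go]
        rw [show List.drop (['R'] : List Char).length ('R' :: rest) = rest from rfl]
        rw [ih f [] (cur.reverse :: acc) (by simpa using Nat.lt_of_succ_lt_succ hf)]
        simp [pvSplitR]
        cases pvSplitR rest <;> rfl
      · have hps : List.isPrefixOf ['R'] (c :: rest) = false := by
          simp only [List.isPrefixOf, Bool.and_true]
          exact beq_eq_false_iff_ne.mpr (fun h => hc h.symm)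
        simp only [PySem.Chars.splitOn.go, hps]
        rw [ih f (c :: cur) acc (by simpa using Nat.lt_of_succ_lt_succ hf)]
        simp only [pvSplitR, if_neg hc]
        cases h : pvSplitR rest with
        | nil => exact absurd h (pvSplitR_ne_nil rest)
        | cons a t => simp

theorem pv_splitOn_eq (l : List Char) : PySem.Chars.splitOn l ['R'] = pvSplitR l := by
  rw [PySem.Chars.splitOn, pv_split_go_eq l (l.length + 1) [] [] (Nat.lt_succ_self _)]
  cases h : pvSplitR l with
  | nil => exact absurd h (pvSplitR_ne_nil l)
  | cons a t => simp

-- A's loop is trivially true when there is no 'S'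
theorem pvLoopA_noS (n : Int) (l : List Char) (hl : 'S' ∉ l) : ∀ b, pvLoopA n l b = true := by
  induction l with
  | nil => intro b; simp [pvLoopA]
  | cons c rest ih =>
    intro b
    simp only [List.mem_cons, not_or] at hl
    simp only [pvLoopA]
    split
    · exact ih hl.2 n
    · rw [if_neg (by exact fun h => hl.1 h.symm)]
      exact ih hl.2 b

-- with negative capacity, A fails as soon as some 'S' occurs
theorem pvLoopA_neg (n : Int) (hn : n < 0) (l : List Char) : ∀ b, b < 0 → 'S' ∈ l →
    pvLoopA n l b = false := by
  induction l with
  | nil => intro b _ h; simp at h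
  | cons c rest ih =>
    intro b hb hmem
    simp only [pvLoopA]
    by_cases hc : c = 'R'
    · rw [if_pos hc]
      have : 'S' ∈ rest := by
        rcases List.mem_cons.mp hmem with h | h
        · exact absurd h.symm (by subst hc; decide)
        · exact h
      exact ih n hn this
    · rw [if_neg hc]
      by_cases hs : c = 'S'
      · rw [if_pos hs, if_pos (by omega)]
      · rw [if_neg hs]
        have : 'S' ∈ rest := by
          rcases List.mem_cons.mp hmem with h | h
          · exact absurd h.symm hs
          · exact h
        exact ih b hb this

-- with positive capacity, A's loop equals the per-segment count check
theorem pvLoopA_pos (n : Int) (hn : 0 < n) (l : List Char) : ∀ b : Int, 0 ≤ b →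
    pvLoopA n l b =
      (match pvSplitR l with
       | [] => true
       | seg :: rest =>
           decide ((seg.count 'S' : Int) ≤ b) &&
             rest.all (fun t => decide ((t.count 'S' : Int) ≤ n))) := by
  induction l with
  | nil => intro b hb; simp [pvLoopA, pvSplitR]; omega
  | cons c rest ih =>
    intro b hb
    simp only [pvLoopA, pvSplitR]
    by_cases hc : c = 'R'
    · rw [if_pos hc, if_pos hc]
      rw [ih n (le_of_lt hn)]
      cases h : pvSplitR rest with
      | nil => exact absurd h (pvSplitR_ne_nil rest)
      | cons a t =>
        simp only [List.all_cons, List.count_nil, Nat.cast_zero]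
        rw [show (decide ((0 : Int) ≤ b)) = true from decide_eq_true hb]
        simp
    · rw [if_neg hc, if_neg hc]
      cases h : pvSplitR rest with
      | nil => exact absurd h (pvSplitR_ne_nil rest)
      | cons a t =>
        by_cases hs : c = 'S'
        · rw [if_pos hs]
          subst hs
          by_cases hb0 : b - 1 < 0
          · rw [if_pos hb0]
            simp only [List.modifyHead, List.count_cons_self]
            have : ¬ ((a.count 'S' : Int) + 1 ≤ b) := by
              have : (0 : Int) ≤ (a.count 'S' : Int) := Int.natCast_nonneg _
              omega
            simp [this]
          · rw [if_neg hb0]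
            rw [ih (b - 1) (by omega)]
            rw [h]
            simp only [List.modifyHead, List.count_cons_self]
            congr 1
            rw [decide_eq_decide]
            push_cast
            omega
        · rw [if_neg hs]
          rw [ih b hb, h]
          simp [hs]

-- singleton infix iff membership
theorem pv_singleton_infix (c : Char) (l : List Char) : [c] <:+: l ↔ c ∈ l := by
  constructor
  · rintro ⟨pre, suf, h⟩
    subst h; simp
  · intro h
    rcases List.append_of_mem h with ⟨pre, suf, h⟩
    exact ⟨pre, suf, by simp [h]⟩

-- ===== VERDICT (by name: the statement is the Claim_ definition above) =====
theorem is_valid_shooting_activity_spec : Claim_equal_is_valid_shooting_activity := by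
  intro s n _
  unfold Spec_is_valid_shooting_activity
  unfold is_valid_shooting_activity is_valid_shooting_activity_alt
  by_cases hz : n = 0
  · simp [hz]
  · rw [if_neg hz, if_neg hz]
    have hmem : (PySem.Str.isIn "S" s = false) ↔ 'S' ∉ s.toList := by
      rw [← Bool.not_eq_true, PySem.Str.isIn_iff_infix,
        show ("S" : String).toList = ['S'] by decide, pv_singleton_infix]
    by_cases hS : 'S' ∈ s.toList
    · rw [if_neg (by rw [hmem]; exact fun h => h hS)]
      rw [pv_splitOn_eq]
      simp only [pv_count_eq]
      rcases lt_or_gt_of_ne hz with hneg | hpos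
      · rw [pvLoopA_neg n hneg s.toList n hneg hS]
        cases h : pvSplitR s.toList with
        | nil => exact absurd h (pvSplitR_ne_nil _)
        | cons a t =>
          have : ¬ ((a.count 'S' : Int) ≤ n) := by
            have : (0 : Int) ≤ (a.count 'S' : Int) := Int.natCast_nonneg _
            omega
          simp [List.all_cons, this]
      · rw [pvLoopA_pos n hpos s.toList n (le_of_lt hpos)]
        cases h : pvSplitR s.toList with
        | nil => exact absurd h (pvSplitR_ne_nil _)
        | cons a t => simp [List.all_cons]
    · rw [if_pos (by rw [hmem]; exact hS)]
      exact pvLoopA_noS n s.toList hS n
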